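-- pv_equiv track=rewrite | github.com/fjben/seek | run_OpenKEembeddings_v2.py | buildIds
-- ===== SOURCE A (Python) =====
-- def buildIds(g):
--     """
--     Assigns ids to KG nodes and KG relations.
--     :param g: knowledge graph;
--     :return: 2 dictionaries and one list. "dic_nodes" is a dictionary with KG nodes and respective ids. "dic_relations" is a dictionary with type of relations in the KG and respective ids. "list_triples" is a list with triples of the KG.
--     """
--     dic_nodes = {}
--     id_node = 0
--     id_relation = 0
--     dic_relations = {}
--     list_triples = []
--
--     for (subj, predicate, obj) in g:
--         if str(subj) not in dic_nodes:
--             dic_nodes[str(subj)] = id_node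
--             id_node = id_node + 1
--         if str(obj) not in dic_nodes:
--             dic_nodes[str(obj)] = id_node
--             id_node = id_node + 1
--         if str(predicate) not in dic_relations:
--             dic_relations[str(predicate)] = id_relation
--             id_relation = id_relation + 1
--         list_triples.append([dic_nodes[str(subj)], dic_relations[str(predicate)], dic_nodes[str(obj)]])
--
--     return dic_nodes, dic_relations, list_triples
-- ===== SOURCE B (Python) =====
-- def buildIds(g):
--     """Two-pass re-implementation: materialize the graph, register all ids first
--     (ids = current dict length), then build the triple list by pure lookup."""
--     triples = list(g)
--     dic_nodes = {}
--     dic_relations = {}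
--     for subj, predicate, obj in triples:
--         s, p, o = str(subj), str(predicate), str(obj)
--         if s not in dic_nodes:
--             dic_nodes[s] = len(dic_nodes)
--         if o not in dic_nodes:
--             dic_nodes[o] = len(dic_nodes)
--         if p not in dic_relations:
--             dic_relations[p] = len(dic_relations)
--     list_triples = [[dic_nodes[str(s)], dic_relations[str(p)], dic_nodes[str(o)]]
--                     for s, p, o in triples]
--     return dic_nodes, dic_relations, list_triples
-- ===== Notes on version B (the rewrite author's own statement) =====
-- stated objective: alternative
-- what changed: B materializes the graph and makes two passes: one registration pass where ids are the current dict length (no counters), then a lookup-only comprehension builds the triples, instead of A's single pass interleaving registration, counter bookkeeping and triple building.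
import Mathlib
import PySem

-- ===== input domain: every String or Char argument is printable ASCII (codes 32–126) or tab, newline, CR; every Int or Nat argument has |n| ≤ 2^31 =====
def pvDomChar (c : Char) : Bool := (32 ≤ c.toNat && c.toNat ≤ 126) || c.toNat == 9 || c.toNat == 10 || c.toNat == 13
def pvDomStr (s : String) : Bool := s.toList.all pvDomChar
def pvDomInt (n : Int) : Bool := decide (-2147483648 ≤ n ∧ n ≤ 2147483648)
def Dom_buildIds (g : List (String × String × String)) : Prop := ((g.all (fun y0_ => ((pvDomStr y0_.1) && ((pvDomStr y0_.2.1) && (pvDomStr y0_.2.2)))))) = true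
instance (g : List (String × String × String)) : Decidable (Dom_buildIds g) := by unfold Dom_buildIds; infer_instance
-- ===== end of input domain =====

-- B: two-pass decomposition — one registration pass (ids = current dict length), then a lookup-only map builds the triples; same results as A's single interleaved pass.


-- ===== PORT A =====
-- A's registration: 'if k not in d: d[k] = id; id += 1' on the (dict, counter) pair
def regA (st : PySem.Dict String Int × Int) (k : String) : PySem.Dict String Int × Int :=
  if st.1.contains k then st else (st.1.insert k st.2, st.2 + 1)

-- A's loop body: register subj, obj into nodes, predicate into relations, append the triple
-- (Python's d[k] is ported as getD _ 0: the key was just registered, so it is present)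
def stepA (st : (PySem.Dict String Int × Int) × (PySem.Dict String Int × Int) × List (List Int))
    (t : String × String × String) :
    (PySem.Dict String Int × Int) × (PySem.Dict String Int × Int) × List (List Int) :=
  let ns := regA (regA st.1 t.1) t.2.2
  let rs := regA st.2.1 t.2.1
  (ns, rs, st.2.2 ++ [[ns.1.getD t.1 0, rs.1.getD t.2.1 0, ns.1.getD t.2.2 0]])

def buildIds (g : List (String × String × String)) : (List (String × Int)) × (List (String × Int)) × List (List Int) :=
  let st := g.foldl stepA ((PySem.Dict.empty, 0), (PySem.Dict.empty, 0), [])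
  (st.1.1.items, st.2.1.1.items, st.2.2)

-- ===== PORT B =====
-- B's registration: 'if k not in d: d[k] = len(d)' (no counter)
def regB (d : PySem.Dict String Int) (k : String) : PySem.Dict String Int :=
  if d.contains k then d else d.insert k (d.size : Int)

-- B's first pass registers subj, obj, predicate; no triples are built here
def regT (ds : PySem.Dict String Int × PySem.Dict String Int) (t : String × String × String) :
    PySem.Dict String Int × PySem.Dict String Int :=
  (regB (regB ds.1 t.1) t.2.2, regB ds.2 t.2.1)

def buildIds_alt (g : List (String × String × String)) : (List (String × Int)) × (List (String × Int)) × List (List Int) :=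
  let ds := g.foldl regT (PySem.Dict.empty, PySem.Dict.empty)
  let triples := g.map (fun t => [ds.1.getD t.1 0, ds.2.getD t.2.1 0, ds.1.getD t.2.2 0])
  (ds.1.items, ds.2.items, triples)

-- ===== PRECONDITION & SPEC =====
def Spec_buildIds (g : List (String × String × String)) (out : (List (String × Int)) × (List (String × Int)) × List (List Int)) : Prop := out = buildIds_alt g
instance (g : List (String × String × String)) (out : (List (String × Int)) × (List (String × Int)) × List (List Int)) : Decidable (Spec_buildIds g out) := by unfold Spec_buildIds; infer_instance

-- ===== CLAIM (what is proved, stated in full; the proofs are below) =====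
def Claim_equal_buildIds : Prop := ∀ (g : List (String × String × String)), Dom_buildIds g → Spec_buildIds g (buildIds g)

-- ===== LEMMAS AND PROOFS =====

-- registration only appends fresh keys: existing lookups are preserved
theorem regB_mono (d : PySem.Dict String Int) (k k' : String) (v : Int)
    (h : d.get? k' = some v) : (regB d k).get? k' = some v := by
  unfold regB
  split
  · exact h
  · rename_i hc
    rw [PySem.Dict.get?_insert]
    split
    · rename_i he
      rw [he] at h
      rw [(PySem.Dict.get?_eq_none_iff_contains d _).mpr (by simpa using hc)] at h
      cases h
    · exact h

-- after registering k, a lookup of k succeeds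
theorem regB_self (d : PySem.Dict String Int) (k : String) :
    ∃ v, (regB d k).get? k = some v := by
  unfold regB
  split
  · rename_i hc
    rcases Option.isSome_iff_exists.mp (PySem.Dict.contains_eq_isSome_get? d k ▸ hc) with ⟨v, hv⟩
    exact ⟨v, hv⟩
  · exact ⟨(d.size : Int), PySem.Dict.get?_insert_self d k _⟩

theorem foldT_mono_n (xs : List (String × String × String))
    (ds : PySem.Dict String Int × PySem.Dict String Int) (k : String) (v : Int)
    (h : ds.1.get? k = some v) : (xs.foldl regT ds).1.get? k = some v := by
  induction xs generalizing ds with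
  | nil => exact h
  | cons x xs ih =>
      exact ih _ (regB_mono _ _ _ _ (regB_mono _ _ _ _ h))

theorem foldT_mono_r (xs : List (String × String × String))
    (ds : PySem.Dict String Int × PySem.Dict String Int) (k : String) (v : Int)
    (h : ds.2.get? k = some v) : (xs.foldl regT ds).2.get? k = some v := by
  induction xs generalizing ds with
  | nil => exact h
  | cons x xs ih =>
      exact ih _ (regB_mono _ _ _ _ h)

-- getD agrees between an intermediate dict and the final dict on a registered key (nodes)
theorem getD_final_n (xs : List (String × String × String))
    (ds : PySem.Dict String Int × PySem.Dict String Int) (k : String) (v : Int)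
    (h : ds.1.get? k = some v) :
    (xs.foldl regT ds).1.getD k 0 = ds.1.getD k 0 := by
  rw [PySem.Dict.getD_of_get?_eq_some _ _ h,
      PySem.Dict.getD_of_get?_eq_some _ _ (foldT_mono_n xs ds k v h)]

theorem getD_final_r (xs : List (String × String × String))
    (ds : PySem.Dict String Int × PySem.Dict String Int) (k : String) (v : Int)
    (h : ds.2.get? k = some v) :
    (xs.foldl regT ds).2.getD k 0 = ds.2.getD k 0 := by
  rw [PySem.Dict.getD_of_get?_eq_some _ _ h,
      PySem.Dict.getD_of_get?_eq_some _ _ (foldT_mono_r xs ds k v h)]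

-- A's counter always equals the dict size, so regA and regB register identically
theorem regAB (d : PySem.Dict String Int) (k : String) :
    regA (d, (d.size : Int)) k = (regB d k, ((regB d k).size : Int)) := by
  unfold regA regB
  split
  · rfl
  · rename_i hc
    simp [PySem.Dict.size_insert, hc]

-- the main invariant: A's fold is B's registration fold plus final-dict-lookup triples
theorem mainInv (xs : List (String × String × String))
    (dn dr : PySem.Dict String Int) (tr : List (List Int)) :
    xs.foldl stepA ((dn, (dn.size : Int)), (dr, (dr.size : Int)), tr)
      = (((xs.foldl regT (dn, dr)).1, (((xs.foldl regT (dn, dr)).1.size : Int))),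
         ((xs.foldl regT (dn, dr)).2, (((xs.foldl regT (dn, dr)).2.size : Int))),
         tr ++ xs.map (fun t => [(xs.foldl regT (dn, dr)).1.getD t.1 0,
                                 (xs.foldl regT (dn, dr)).2.getD t.2.1 0,
                                 (xs.foldl regT (dn, dr)).1.getD t.2.2 0])) := by
  induction xs generalizing dn dr tr with
  | nil => simp
  | cons x xs ih =>
      obtain ⟨s, p, o⟩ := x
      have hstep : stepA ((dn, (dn.size : Int)), (dr, (dr.size : Int)), tr) (s, p, o)
          = ((regB (regB dn s) o, ((regB (regB dn s) o).size : Int)),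
             (regB dr p, ((regB dr p).size : Int)),
             tr ++ [[(regB (regB dn s) o).getD s 0, (regB dr p).getD p 0,
                     (regB (regB dn s) o).getD o 0]]) := by
        simp only [stepA, regAB]
      have hfoldT : List.foldl regT (dn, dr) ((s, p, o) :: xs)
          = List.foldl regT (regB (regB dn s) o, regB dr p) xs := by
        simp [regT]
      -- registered keys have some value in the intermediate dicts
      obtain ⟨vo, hvo⟩ := regB_self (regB dn s) o
      obtain ⟨vs0, hvs0⟩ := regB_self dn s
      have hvs : (regB (regB dn s) o).get? s = some vs0 := regB_mono _ _ _ _ hvs0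
      obtain ⟨vp, hvp⟩ := regB_self dr p
      rw [List.foldl_cons, hstep, ih, hfoldT]
      refine congrArg _ (congrArg _ ?_)
      rw [List.map_cons, List.append_assoc]
      refine congrArg _ ?_
      simp only [List.singleton_append]
      refine congrArg₂ _ ?_ rfl
      rw [getD_final_n xs _ s vs0 hvs, getD_final_n xs _ o vo hvo,
          getD_final_r xs _ p vp hvp]

-- ===== VERDICT (by name: the statement is the Claim_ definition above) =====
theorem buildIds_spec : Claim_equal_buildIds := by
  intro g _
  show buildIds g = buildIds_alt g
  unfold buildIds buildIds_alt
  have h := mainInv g PySem.Dict.empty PySem.Dict.empty []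
  simp only [PySem.Dict.size_empty, Nat.cast_zero] at h
  rw [h]
  rfl
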